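-- pv_equiv track=rewrite | github.com/pjrice/BCB-Modeling | WM_old/util/newEstPars_tbtRTs_ttbbAccs.py | compute_acc
-- ===== SOURCE A (Python) =====
-- def compute_acc (correctResponses,responses):
--
--     #remove RTs from responses
--     responses = [[x[0],x[2]] for x in responses]
--
--     #calculate total accuracy
--     totAcc_CR = [x[0] for x in correctResponses]
--     totAcc_SR = [x[0] for x in responses]
--     totAccVec = [1 if i==j else 0 for i,j in zip(totAcc_CR,totAcc_SR)]
--
--     #calculate target accuracy
--     tarAcc_CR = [x[0] for x in correctResponses if x[1]=='target']
--     tarAcc_SR = [x[0] for x in responses if x[1]=='target']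
--     tarAccVec = [1 if i==j else 0 for i,j in zip(tarAcc_CR,tarAcc_SR)]
--
--     #calculate lure accuracy
--     lurAcc_CR = [x[0] for x in correctResponses if x[1]=='lure']
--     lurAcc_SR = [x[0] for x in responses if x[1]=='lure']
--     lurAccVec = [1 if i==j else 0 for i,j in zip(lurAcc_CR,lurAcc_SR)]
--
--     #calculate nonlure accuracy
--     nlrAcc_CR = [x[0] for x in correctResponses if x[1]=='nonlure']
--     nlrAcc_SR = [x[0] for x in responses if x[1]=='nonlure']
--     nlrAccVec = [1 if i==j else 0 for i,j in zip(nlrAcc_CR,nlrAcc_SR)]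
--
--
--     return([totAccVec, tarAccVec, lurAccVec, nlrAccVec])
-- ===== SOURCE B (Python) =====
-- def compute_acc(correctResponses, responses):
--     # one pass over each input builds category -> list of response values (order kept)
--     crGroups = {}
--     for v, c in correctResponses:
--         crGroups[c] = crGroups.get(c, []) + [v]
--     srGroups = {}
--     for v, _, c in responses:
--         srGroups[c] = srGroups.get(c, []) + [v]
--     crAll = [v for v, _ in correctResponses]
--     srAll = [v for v, _, _ in responses]
--
--     def vec(a, b):
--         return [1 if i == j else 0 for i, j in zip(a, b)]
--
--     return [vec(crAll, srAll)] + [vec(crGroups.get(c, []), srGroups.get(c, []))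
--                                   for c in ('target', 'lure', 'nonlure')]
-- ===== Notes on version B (the rewrite author's own statement) =====
-- stated objective: simpler
-- what changed: Replaces the eight per-category filtered comprehensions with one grouping pass over each input list building a dict category->values, then zips the grouped lists per category.
import Mathlib
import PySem

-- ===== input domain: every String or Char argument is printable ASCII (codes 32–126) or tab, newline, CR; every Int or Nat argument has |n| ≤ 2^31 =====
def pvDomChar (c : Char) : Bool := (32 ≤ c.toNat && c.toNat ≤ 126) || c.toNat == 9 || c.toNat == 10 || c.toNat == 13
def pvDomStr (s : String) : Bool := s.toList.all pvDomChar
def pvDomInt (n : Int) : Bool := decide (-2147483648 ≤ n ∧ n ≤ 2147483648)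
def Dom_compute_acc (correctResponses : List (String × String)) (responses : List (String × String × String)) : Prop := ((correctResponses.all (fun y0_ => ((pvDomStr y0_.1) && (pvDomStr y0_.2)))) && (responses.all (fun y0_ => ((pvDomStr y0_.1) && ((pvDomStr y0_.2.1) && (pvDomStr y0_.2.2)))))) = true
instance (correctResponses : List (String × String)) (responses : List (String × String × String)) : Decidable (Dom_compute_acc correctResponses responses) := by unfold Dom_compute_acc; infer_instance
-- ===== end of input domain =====

-- B replaces A's eight per-category filter passes with one grouping pass per input list (simpler decomposition).

-- ===== PORT A =====
def compute_acc (correctResponses : List (String × String)) (responses : List (String × String × String)) : List (List Int) :=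
  -- remove RTs from responses
  let responses' := responses.map (fun x => (x.1, x.2.2))
  -- total accuracy
  let totAcc_CR := correctResponses.map (fun x => x.1)
  let totAcc_SR := responses'.map (fun x => x.1)
  let totAccVec := (totAcc_CR.zip totAcc_SR).map (fun p => if p.1 == p.2 then (1 : Int) else 0)
  -- target accuracy
  let tarAcc_CR := (correctResponses.filter (fun x => x.2 == "target")).map (fun x => x.1)
  let tarAcc_SR := (responses'.filter (fun x => x.2 == "target")).map (fun x => x.1)
  let tarAccVec := (tarAcc_CR.zip tarAcc_SR).map (fun p => if p.1 == p.2 then (1 : Int) else 0)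
  -- lure accuracy
  let lurAcc_CR := (correctResponses.filter (fun x => x.2 == "lure")).map (fun x => x.1)
  let lurAcc_SR := (responses'.filter (fun x => x.2 == "lure")).map (fun x => x.1)
  let lurAccVec := (lurAcc_CR.zip lurAcc_SR).map (fun p => if p.1 == p.2 then (1 : Int) else 0)
  -- nonlure accuracy
  let nlrAcc_CR := (correctResponses.filter (fun x => x.2 == "nonlure")).map (fun x => x.1)
  let nlrAcc_SR := (responses'.filter (fun x => x.2 == "nonlure")).map (fun x => x.1)
  let nlrAccVec := (nlrAcc_CR.zip nlrAcc_SR).map (fun p => if p.1 == p.2 then (1 : Int) else 0)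
  [totAccVec, tarAccVec, lurAccVec, nlrAccVec]

-- ===== PORT B =====
-- helper vec(a, b) of Source B
def pvVec (a b : List String) : List Int :=
  (a.zip b).map (fun p => if p.1 == p.2 then (1 : Int) else 0)

def compute_acc_alt (correctResponses : List (String × String)) (responses : List (String × String × String)) : List (List Int) :=
  -- crGroups[c] = crGroups.get(c, []) + [v]
  let crGroups := correctResponses.foldl (fun d x => d.modify x.2 [] (· ++ [x.1])) PySem.Dict.empty
  let srGroups := responses.foldl (fun d x => d.modify x.2.2 [] (· ++ [x.1])) PySem.Dict.empty
  let crAll := correctResponses.map (fun x => x.1)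
  let srAll := responses.map (fun x => x.1)
  [pvVec crAll srAll] ++
    (["target", "lure", "nonlure"].map (fun c => pvVec (crGroups.getD c []) (srGroups.getD c [])))

-- ===== PRECONDITION & SPEC =====
def Spec_compute_acc (correctResponses : List (String × String)) (responses : List (String × String × String)) (out : List (List Int)) : Prop := out = compute_acc_alt correctResponses responses
instance (correctResponses : List (String × String)) (responses : List (String × String × String)) (out : List (List Int)) : Decidable (Spec_compute_acc correctResponses responses out) := by unfold Spec_compute_acc; infer_instance

-- ===== CLAIM (what is proved, stated in full; the proofs are below) =====
def Claim_equal_compute_acc : Prop := ∀ (correctResponses : List (String × String)) (responses : List (String × String × String)), Dom_compute_acc correctResponses responses → Spec_compute_acc correctResponses responses (compute_acc correctResponses responses)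

-- ===== LEMMAS AND PROOFS =====

-- a grouping fold with key k and value v, looked up at c, is the filtered map
theorem getD_group_fold {α β : Type} (l : List α) (k : α → String) (v : α → β)
    (c : String) (d : PySem.Dict String (List β)) :
    (l.foldl (fun d x => d.modify (k x) [] (· ++ [v x])) d).getD c []
      = d.getD c [] ++ (l.filter (fun x => k x == c)).map v := by
  have h := PySem.Dict.getD_foldl_modify_append (l := l.map (fun x => (k x, v x))) (d := d) (c := c)
  simpa [List.foldl_map, List.filter_map, List.map_map, Function.comp] using h

-- ===== VERDICT (by name: the statement is the Claim_ definition above) =====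
theorem compute_acc_spec : Claim_equal_compute_acc := by
  intro cr rs _
  show compute_acc cr rs = compute_acc_alt cr rs
  simp only [compute_acc, compute_acc_alt, pvVec, List.map_map, List.filter_map,
    getD_group_fold, PySem.Dict.getD_empty, List.nil_append, List.map_cons, List.map_nil,
    List.cons_append]
  simp [Function.comp_def]
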